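-- pv_equiv track=rewrite | github.com/nedatghd/Financial-data-prediction- | utils.py | spe
-- ===== SOURCE A (Python) =====
-- def spe(index, in_seq_len, out_seq_len, batch_size=16):
--
--     l = len(index) // batch_size
--     start = index[-1] - out_seq_len - l*batch_size
--     i = 0
--     while start<in_seq_len:
--         start += batch_size
--         i+=1
--     return l-i
-- ===== SOURCE B (Python) =====
-- def spe(index, in_seq_len, out_seq_len, batch_size=16):
--     l = len(index) // batch_size
--     diff = in_seq_len - (index[-1] - out_seq_len - l * batch_size)
--     i = 0 if diff <= 0 else -(-diff // batch_size)
--     return l - i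
-- ===== Notes on version B (the rewrite author's own statement) =====
-- stated objective: simpler
-- what changed: replaces the step-by-step while loop counting batch_size increments with a closed-form ceiling-division formula for the iteration count
import Mathlib
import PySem

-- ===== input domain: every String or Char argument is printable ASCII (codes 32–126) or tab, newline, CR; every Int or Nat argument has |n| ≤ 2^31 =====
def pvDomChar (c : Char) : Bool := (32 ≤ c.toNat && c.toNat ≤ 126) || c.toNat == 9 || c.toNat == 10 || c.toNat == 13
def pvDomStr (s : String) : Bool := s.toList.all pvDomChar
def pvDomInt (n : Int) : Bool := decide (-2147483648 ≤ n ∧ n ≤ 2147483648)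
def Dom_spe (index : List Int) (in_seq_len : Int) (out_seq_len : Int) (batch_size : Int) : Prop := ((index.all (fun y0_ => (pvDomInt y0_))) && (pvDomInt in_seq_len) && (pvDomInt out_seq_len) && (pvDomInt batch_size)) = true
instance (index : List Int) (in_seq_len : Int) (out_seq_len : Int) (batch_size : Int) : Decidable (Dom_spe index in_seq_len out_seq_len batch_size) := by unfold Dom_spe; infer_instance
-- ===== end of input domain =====

-- B replaces A's step-by-step while loop with a closed-form ceiling-division formula for the loop count.

-- ===== PORT A =====
-- the while loop of A; the `0 < batch_size` test is only a totality guard: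
-- when batch_size ≤ 0 and start < in_seq_len the Python loop never terminates (outside Pre_)
def speLoop (in_seq_len batch_size : Int) (start i : Int) : Int :=
  if _h : start < in_seq_len then
    if _hb : 0 < batch_size then
      speLoop in_seq_len batch_size (start + batch_size) (i + 1)
    else i
  else i
termination_by (in_seq_len - start).toNat
decreasing_by omega

def spe (index : List Int) (in_seq_len : Int) (out_seq_len : Int) (batch_size : Int) : Int :=
  let l := PySem.Int.floordiv (index.length : Int) batch_size
  -- index[-1]: getD 0 is never taken under Pre_ (index ≠ [])
  let start := (PySem.List.pyGet? index (-1)).getD 0 - out_seq_len - l * batch_size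
  l - speLoop in_seq_len batch_size start 0

-- ===== PORT B =====
def spe_alt (index : List Int) (in_seq_len : Int) (out_seq_len : Int) (batch_size : Int) : Int :=
  let l := PySem.Int.floordiv (index.length : Int) batch_size
  let diff := in_seq_len - ((PySem.List.pyGet? index (-1)).getD 0 - out_seq_len - l * batch_size)
  let i := if diff ≤ 0 then 0 else -(PySem.Int.floordiv (-diff) batch_size)
  l - i

-- ===== PRECONDITION & SPEC =====
-- Pre_ excludes: empty index (IndexError), batch_size = 0 (ZeroDivisionError), and
-- batch_size < 0 with initial start < in_seq_len, where A's while loop never terminates.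
def Pre_spe (index : List Int) (in_seq_len : Int) (out_seq_len : Int) (batch_size : Int) : Prop :=
  index ≠ [] ∧ batch_size ≠ 0 ∧
    (0 < batch_size ∨
      in_seq_len ≤ index.getLast?.getD 0 - out_seq_len -
        PySem.Int.floordiv (index.length : Int) batch_size * batch_size)
instance (index : List Int) (in_seq_len : Int) (out_seq_len : Int) (batch_size : Int) : Decidable (Pre_spe index in_seq_len out_seq_len batch_size) := by unfold Pre_spe; infer_instance

def pvWitness_spe : List Int × Int × Int × Int := ([3, 7], 5, 1, 2)

def Spec_spe (index : List Int) (in_seq_len : Int) (out_seq_len : Int) (batch_size : Int) (out : Int) : Prop := out = spe_alt index in_seq_len out_seq_len batch_size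
instance (index : List Int) (in_seq_len : Int) (out_seq_len : Int) (batch_size : Int) (out : Int) : Decidable (Spec_spe index in_seq_len out_seq_len batch_size out) := by unfold Spec_spe; infer_instance

-- ===== CLAIM (what is proved, stated in full; the proofs are below) =====
def Claim_equal_spe : Prop := ∀ (index : List Int) (in_seq_len : Int) (out_seq_len : Int) (batch_size : Int), Dom_spe index in_seq_len out_seq_len batch_size → Pre_spe index in_seq_len out_seq_len batch_size → Spec_spe index in_seq_len out_seq_len batch_size (spe index in_seq_len out_seq_len batch_size)

-- ===== LEMMAS AND PROOFS =====

-- one step of the ceiling count: for 0 < b, 0 < a, ⌈a/b⌉ = 1 + ⌈(a-b)/b⌉ (with ⌈x/b⌉ = 0 for x ≤ 0)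
lemma ceil_step (a b : Int) (hb : 0 < b) (ha : 0 < a) :
    -(PySem.Int.floordiv (-a) b) =
      1 + (if a - b ≤ 0 then 0 else -(PySem.Int.floordiv (-(a - b)) b)) := by
  split_ifs with h
  · rw [PySem.Int.neg_floordiv_neg_eq_iff_of_pos hb]
    constructor <;> nlinarith
  · have hq : (-(PySem.Int.floordiv (-(a - b)) b) - 1) * b < a - b ∧
        a - b ≤ -(PySem.Int.floordiv (-(a - b)) b) * b :=
      (PySem.Int.neg_floordiv_neg_eq_iff_of_pos hb).mp rfl
    rw [PySem.Int.neg_floordiv_neg_eq_iff_of_pos hb]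
    constructor <;> nlinarith [hq.1, hq.2]

-- A's while loop counts exactly the ceiling of (in_seq_len - start) / batch_size
lemma speLoop_eq (insl bs : Int) (hb : 0 < bs) :
    ∀ (n : Nat) (start i : Int), (insl - start).toNat ≤ n →
      speLoop insl bs start i =
        i + (if insl - start ≤ 0 then 0 else -(PySem.Int.floordiv (-(insl - start)) bs)) := by
  intro n
  induction n with
  | zero =>
    intro start i hn
    have : ¬ start < insl := by omega
    rw [speLoop]
    simp [this, show insl - start ≤ 0 by omega]
  | succ n ih =>
    intro start i hn
    by_cases hlt : start < insl
    · rw [speLoop]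
      simp only [hlt, hb, dif_pos]
      rw [ih (start + bs) (i + 1) (by omega)]
      have := ceil_step (insl - start) bs hb (by omega)
      have harg : insl - (start + bs) = insl - start - bs := by ring
      rw [harg]
      simp only [show ¬ insl - start ≤ 0 by omega, if_neg, not_false_iff]
      omega
    · rw [speLoop]
      simp [hlt, show insl - start ≤ 0 by omega]

-- ===== VERDICT (by name: the statement is the Claim_ definition above) =====
theorem spe_spec : Claim_equal_spe := by
  intro index insl outl bs _hdom hpre
  obtain ⟨hne, hbz, hcase⟩ := hpre
  unfold Spec_spe spe spe_alt
  dsimp only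
  rw [PySem.List.pyGet?_neg_one]
  rcases hcase with hb | hge
  · -- positive batch_size: loop = ceiling formula
    rw [speLoop_eq insl bs hb _ _ 0 (le_refl _)]
    simp only [zero_add]
  · -- batch_size < 0 but the loop condition is false at entry: both sides give l
    rw [speLoop]
    have hnlt : ¬ (index.getLast?.getD 0 - outl - PySem.Int.floordiv (index.length : Int) bs * bs < insl) := by omega
    simp only [hnlt, dif_neg, not_false_iff]
    have : insl - (index.getLast?.getD 0 - outl - PySem.Int.floordiv (index.length : Int) bs * bs) ≤ 0 := by omega
    simp [this]
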